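-- pv_equiv track=rewrite | github.com/mohitsharma0690/multi_scale_head_gesture | utils/max_window_len.py | get_gesture_seq_count
-- ===== SOURCE A (Python) =====
-- NUM_CLASSES = 11
--
-- MAX_SLIDING_WINDOW = 180
--
-- def get_gesture_seq_count(a):
--   i, gest_seq_count, seq_len = 0, [0]*NUM_CLASSES, len(a)
--
--   while i < seq_len:
--     j, target_gest = i+1, a[i]
--     while j < seq_len and a[j] == a[i] and j-i < MAX_SLIDING_WINDOW:
--       j = j + 1
--     # define a minimum length for a gesture
--     if j - i > 5:
--       gest_seq_count[a[i]] = gest_seq_count[a[i]] + 1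
--     i = j
--
--   return gest_seq_count
-- ===== SOURCE B (Python) =====
-- from itertools import groupby
--
-- NUM_CLASSES = 11
--
-- MAX_SLIDING_WINDOW = 180
--
-- def get_gesture_seq_count(a):
--   gest_seq_count = [0] * NUM_CLASSES
--   for k, run in groupby(a):
--     q, r = divmod(sum(1 for _ in run), MAX_SLIDING_WINDOW)
--     c = q + (1 if r > 5 else 0)
--     if c:
--       gest_seq_count[k] += c
--   return gest_seq_count
-- ===== Notes on version B (the rewrite author's own statement) =====
-- stated objective: simpler
-- what changed: Replaced the manual nested index-advancing while loops by run-length encoding via itertools.groupby, adding per run the closed-form count divmod(L,180) -> q + (1 if r > 5 else 0) of qualifying 180-capped chunks.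
import Mathlib
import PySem

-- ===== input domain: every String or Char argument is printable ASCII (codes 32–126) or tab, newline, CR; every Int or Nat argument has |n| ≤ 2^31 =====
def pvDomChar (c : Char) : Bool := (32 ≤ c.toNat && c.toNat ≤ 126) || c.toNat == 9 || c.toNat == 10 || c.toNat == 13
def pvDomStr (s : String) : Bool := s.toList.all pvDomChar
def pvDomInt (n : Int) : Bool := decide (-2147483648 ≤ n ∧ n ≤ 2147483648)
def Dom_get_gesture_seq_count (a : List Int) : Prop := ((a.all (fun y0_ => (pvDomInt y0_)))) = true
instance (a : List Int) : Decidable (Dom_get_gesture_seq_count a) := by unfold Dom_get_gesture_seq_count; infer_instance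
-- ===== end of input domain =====

-- B replaces A's nested index-advancing while loops by run-length encoding plus a
-- closed-form divmod count of qualifying 180-capped chunks per run (objective: simpler).

-- ===== PORT A =====
-- `gest[k] = gest[k] + 1` resp. `gest[k] = gest[k] + c` (Python list read+write with a
-- possibly negative index; exact under Pre_, where the index is in range — Python raises
-- IndexError exactly where pyIdx? is none, and such inputs are excluded by Pre_).
def pyIncBy (g : List Int) (k : Int) (c : Int) : List Int :=
  PySem.List.pySetD g k (PySem.List.pyGetD g k 0 + c)

-- inner `while j < seq_len and a[j] == a[i] and j - i < MAX_SLIDING_WINDOW: j = j + 1`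
-- (fuel only makes the loop total: the loop body runs while j < a.length, so any
-- fuel ≥ a.length - j computes the Python loop exactly)
def innerA (a : List Int) (i : Nat) (j : Nat) : Nat → Nat
  | 0 => j
  | fuel + 1 =>
    if j < a.length ∧ a.getD j 0 = a.getD i 0 ∧ j - i < 180 then
      innerA a i (j + 1) fuel
    else j

-- outer `while i < seq_len` loop, state = (i, gest_seq_count); fuel as above (i strictly
-- increases each iteration, so fuel = a.length suffices)
def outerA (a : List Int) (i : Nat) (g : List Int) : Nat → List Int
  | 0 => g
  | fuel + 1 =>
    if i < a.length then
      let j := innerA a i (i + 1) (a.length - (i + 1))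
      outerA a j (if 5 < j - i then pyIncBy g (a.getD i 0) 1 else g) fuel
    else g

def get_gesture_seq_count (a : List Int) : List Int :=
  outerA a 0 (List.replicate 11 0) a.length

-- ===== PORT B =====
-- itertools.groupby(a), streamed: current run value x with its count n so far
def rleAux (x : Int) (n : Nat) : List Int → List (Int × Nat)
  | [] => [(x, n)]
  | y :: ys => if y = x then rleAux x (n + 1) ys else (x, n) :: rleAux y 1 ys

def rle : List Int → List (Int × Nat)
  | [] => []
  | x :: xs => rleAux x 1 xs

-- body of B's `for k, run in groupby(a)` loop: q, r = divmod(L, 180); c = q + (r > 5)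
def stepB (g : List Int) (kl : Int × Nat) : List Int :=
  let q := kl.2 / 180
  let r := kl.2 % 180
  let c : Int := (q : Int) + (if 5 < r then 1 else 0)
  if c ≠ 0 then pyIncBy g kl.1 c else g

def get_gesture_seq_count_alt (a : List Int) : List Int :=
  (rle a).foldl stepB (List.replicate 11 0)

-- ===== PRECONDITION & SPEC =====
-- Pre_ excludes exactly the inputs on which Python A raises IndexError: a run of at least
-- 6 consecutive equal values whose value lies outside -11..10 (Python indexes the
-- 11-element count list with it, negative values counting from the end).
def Pre_get_gesture_seq_count (a : List Int) : Prop :=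
  ∀ i < a.length,
    (i + 5 < a.length ∧ ∀ t < 5, a.getD (i + t) 0 = a.getD (i + t + 1) 0) →
    (-11 ≤ a.getD i 0 ∧ a.getD i 0 < 11)
instance (a : List Int) : Decidable (Pre_get_gesture_seq_count a) := by
  unfold Pre_get_gesture_seq_count; infer_instance

def pvWitness_get_gesture_seq_count : List Int := [2, 2, 2, 2, 2, 2, 2, -1, 5]

def Spec_get_gesture_seq_count (a : List Int) (out : List Int) : Prop := out = get_gesture_seq_count_alt a
instance (a : List Int) (out : List Int) : Decidable (Spec_get_gesture_seq_count a out) := by unfold Spec_get_gesture_seq_count; infer_instance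

-- ===== CLAIM (what is proved, stated in full; the proofs are below) =====
def Claim_equal_get_gesture_seq_count : Prop := ∀ (a : List Int), Dom_get_gesture_seq_count a → Pre_get_gesture_seq_count a → Spec_get_gesture_seq_count a (get_gesture_seq_count a)

-- ===== LEMMAS AND PROOFS =====

-- length of the maximal prefix of the list equal to x
def prefLen (x : Int) : List Int → Nat
  | [] => 0
  | y :: ys => if y = x then prefLen x ys + 1 else 0

theorem prefLen_le_length (x : Int) (l : List Int) : prefLen x l ≤ l.length := by
  induction l with
  | nil => simp [prefLen]
  | cons y ys ih =>
    simp only [prefLen]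
    split
    · simp; omega
    · simp

theorem prefLen_getD (x : Int) (l : List Int) (d : Nat) (h : d < prefLen x l) :
    l.getD d 0 = x := by
  induction l generalizing d with
  | nil => simp [prefLen] at h
  | cons y ys ih =>
    simp only [prefLen] at h
    split at h
    · cases d with
      | zero => simpa using ‹y = x›
      | succ d' => simpa using ih d' (by omega)
    · omega

theorem prefLen_drop (x : Int) (l : List Int) (d : Nat) (h : d ≤ prefLen x l) :
    prefLen x (l.drop d) = prefLen x l - d := by
  induction l generalizing d with
  | nil => simp [prefLen] at *
  | cons y ys ih =>
    cases d with
    | zero => simp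
    | succ d' =>
      by_cases hy : y = x
      · simp only [prefLen, if_pos hy] at h ⊢
        rw [List.drop_succ_cons, ih d' (by omega)]
        omega
      · simp [prefLen, if_neg hy] at h

theorem rleAux_eq (x : Int) (n : Nat) (xs : List Int) :
    rleAux x n xs = (x, n + prefLen x xs) :: rle (xs.drop (prefLen x xs)) := by
  induction xs generalizing x n with
  | nil => simp [rleAux, rle, prefLen]
  | cons y ys ih =>
    by_cases hy : y = x
    · subst hy
      rw [rleAux, if_pos rfl, ih]
      have hpc : prefLen y (y :: ys) = prefLen y ys + 1 := by simp [prefLen]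
      rw [hpc, List.drop_succ_cons]
      have hn : n + 1 + prefLen y ys = n + (prefLen y ys + 1) := by omega
      rw [hn]
    · simp [rleAux, rle, prefLen, hy]

theorem rle_cons (x : Int) (xs : List Int) :
    rle (x :: xs) = (x, prefLen x xs + 1) :: rle (xs.drop (prefLen x xs)) := by
  rw [rle, rleAux_eq]
  have h1 : 1 + prefLen x xs = prefLen x xs + 1 := by omega
  rw [h1]

theorem pyIdx?_lt (n : Nat) (i : Int) (k : Nat) (h : PySem.List.pyIdx? n i = some k) :
    k < n := by
  simp only [PySem.List.pyIdx?] at h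
  split at h
  · split at h
    · simp at h; omega
    · simp at h
  · split at h
    · simp at h; omega
    · simp at h

theorem pyIncBy_pyIncBy (g : List Int) (x : Int) (c d : Int) :
    pyIncBy (pyIncBy g x c) x d = pyIncBy g x (c + d) := by
  simp only [pyIncBy, PySem.List.pySetD, PySem.List.pySet?, PySem.List.pyGetD,
    PySem.List.pyGet?]
  cases h : PySem.List.pyIdx? g.length x with
  | none => simp [h]
  | some k =>
    have hk : k < g.length := pyIdx?_lt _ _ _ h
    simp [h, List.length_set, hk]
    rw [add_assoc]

theorem innerA_eq (a : List Int) (i : Nat) (j fuel : Nat) (hij : i < j)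
    (hle : j - i ≤ 180) (hf : a.length ≤ j + fuel) :
    innerA a i j fuel = j + min (prefLen (a.getD i 0) (a.drop j)) (180 - (j - i)) := by
  induction fuel generalizing j with
  | zero =>
    rw [List.drop_of_length_le (by omega)]
    simp [innerA, prefLen]
  | succ fuel ih =>
    rw [innerA]
    split
    · rename_i h
      obtain ⟨hj, heq, hlt⟩ := h
      have hdrop : a.drop j = a.getD j 0 :: a.drop (j + 1) := by
        rw [List.drop_eq_getElem_cons hj, List.getD_eq_getElem _ _ hj]
      rw [hdrop]
      simp only [prefLen]
      rw [if_pos heq]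
      rw [ih (j + 1) (by omega) (by omega) (by omega)]
      omega
    · rename_i h
      by_cases hj : j < a.length
      · by_cases heq : a.getD j 0 = a.getD i 0
        · have h180 : ¬ j - i < 180 := fun hl => h ⟨hj, heq, hl⟩
          have : j - i = 180 := by omega
          omega
        · have hdrop : a.drop j = a.getD j 0 :: a.drop (j + 1) := by
            rw [List.drop_eq_getElem_cons hj, List.getD_eq_getElem _ _ hj]
          rw [hdrop]
          simp only [prefLen, if_neg heq]
          omega
      · rw [List.drop_of_length_le (by omega)]
        simp [prefLen]

theorem innerA_ge (a : List Int) (i j fuel : Nat) : j ≤ innerA a i j fuel := by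
  induction fuel generalizing j with
  | zero => simp [innerA]
  | succ f ih =>
    rw [innerA]
    split
    · have := ih (j + 1); omega
    · omega

theorem outerA_fuel (a : List Int) (i : Nat) (g : List Int) (f1 f2 : Nat)
    (h1 : a.length ≤ i + f1) (h2 : a.length ≤ i + f2) :
    outerA a i g f1 = outerA a i g f2 := by
  induction f1 generalizing f2 i g with
  | zero =>
    have hi : ¬ i < a.length := by omega
    cases f2 with
    | zero => rfl
    | succ f2' => rw [outerA, outerA, if_neg hi]
  | succ f1' ih =>
    by_cases hi : i < a.length
    · cases f2 with
      | zero => omega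
      | succ f2' =>
        rw [outerA, outerA, if_pos hi, if_pos hi]
        have hj := innerA_ge a i (i + 1) (a.length - (i + 1))
        exact ih _ _ _ (by omega) (by omega)
    · cases f2 with
      | zero => rw [outerA, outerA, if_neg hi]
      | succ f2' => rw [outerA, outerA, if_neg hi, if_neg hi]

theorem getD_drop (a : List Int) (i d : Nat) (h : i + d < a.length) :
    (a.drop i).getD d 0 = a.getD (i + d) 0 := by
  rw [List.getD_eq_getElem _ _ (by simp; omega), List.getD_eq_getElem _ _ h]
  simp

set_option maxRecDepth 4096 in
theorem outer_run (L : Nat) (a : List Int) (i : Nat) (g : List Int) (fuel : Nat)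
    (hi : i < a.length) (hL : prefLen (a.getD i 0) (a.drop i) = L)
    (hf : a.length ≤ i + fuel) :
    outerA a i g fuel = outerA a (i + L) (stepB g (a.getD i 0, L)) (fuel - L) := by
  have hdrop : a.drop i = a.getD i 0 :: a.drop (i + 1) := by
    rw [List.drop_eq_getElem_cons hi, List.getD_eq_getElem _ _ hi]
  have hpl : prefLen (a.getD i 0) (a.drop (i + 1)) = L - 1 ∧ 1 ≤ L := by
    have h2 : prefLen (a.getD i 0) (a.getD i 0 :: a.drop (i + 1)) =
        prefLen (a.getD i 0) (a.drop (i + 1)) + 1 := by simp [prefLen]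
    rw [hdrop, h2] at hL
    omega
  obtain ⟨hp1, hpL⟩ := hpl
  have hLlen : i + L ≤ a.length := by
    have h1 := prefLen_le_length (a.getD i 0) (a.drop i)
    rw [hL] at h1; simp at h1; omega
  obtain ⟨f, rfl⟩ : ∃ f, fuel = f + 1 := ⟨fuel - 1, by omega⟩
  have hub : outerA a i g (f + 1) =
      outerA a (i + min L 180) (if 5 < min L 180 then pyIncBy g (a.getD i 0) 1 else g) f := by
    rw [outerA, if_pos hi]
    show outerA a (innerA a i (i + 1) (a.length - (i + 1)))
        (if 5 < innerA a i (i + 1) (a.length - (i + 1)) - i then pyIncBy g (a.getD i 0) 1 else g)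
        f = _
    rw [innerA_eq a i (i + 1) (a.length - (i + 1)) (by omega) (by omega) (by omega), hp1]
    have h1 : i + 1 + min (L - 1) (180 - (i + 1 - i)) = i + min L 180 := by omega
    have h2 : i + min L 180 - i = min L 180 := by omega
    rw [h1, h2]
  by_cases h180 : L ≤ 180
  · rw [hub]
    have hmin : min L 180 = L := by omega
    rw [hmin]
    have hg : (if 5 < L then pyIncBy g (a.getD i 0) 1 else g) = stepB g (a.getD i 0, L) := by
      simp only [stepB]
      by_cases h5 : 5 < L
      · rw [if_pos h5]
        have hc : ((L / 180 : Nat) : Int) + (if 5 < L % 180 then (1 : Int) else 0) = 1 := by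
          rcases Nat.lt_or_ge L 180 with h | h
          · have e1 : L / 180 = 0 := by omega
            have e2 : L % 180 = L := by omega
            rw [e1, e2, if_pos h5]; norm_num
          · have hL180 : L = 180 := by omega
            subst hL180; norm_num
        rw [hc]
        norm_num
      · rw [if_neg h5]
        have e1 : L / 180 = 0 := by omega
        have e2 : L % 180 = L := by omega
        have hc : ((L / 180 : Nat) : Int) + (if 5 < L % 180 then (1 : Int) else 0) = 0 := by
          rw [e1, e2, if_neg h5]; norm_num
        rw [hc]
        norm_num
    rw [hg]
    exact outerA_fuel a (i + L) _ f (f + 1 - L) (by omega) (by omega)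
  · -- L > 180 : one full 180-chunk is counted, then recurse on the rest of the run
    rw [hub]
    have hmin : min L 180 = 180 := by omega
    rw [hmin, if_pos (by omega)]
    have hi' : i + 180 < a.length := by omega
    have hx' : a.getD (i + 180) 0 = a.getD i 0 := by
      rw [← getD_drop a i 180 hi']
      exact prefLen_getD _ _ _ (by omega)
    have hL' : prefLen (a.getD (i + 180) 0) (a.drop (i + 180)) = L - 180 := by
      rw [hx']
      have hdd : a.drop (i + 180) = (a.drop i).drop 180 := by rw [List.drop_drop]
      rw [hdd, prefLen_drop _ _ _ (by omega), hL]
    have hrec := outer_run (L - 180) a (i + 180) (pyIncBy g (a.getD i 0) 1) f hi' hL'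
      (by omega)
    rw [hrec, hx']
    have harith : i + 180 + (L - 180) = i + L := by omega
    rw [harith]
    have hsuf : stepB (pyIncBy g (a.getD i 0) 1) (a.getD i 0, L - 180) =
        stepB g (a.getD i 0, L) := by
      simp only [stepB]
      have hq : L / 180 = (L - 180) / 180 + 1 := by omega
      have hr : L % 180 = (L - 180) % 180 := by omega
      obtain ⟨c', hc'⟩ : ∃ c' : Int,
          c' = (((L - 180) / 180 : Nat) : Int) + (if 5 < (L - 180) % 180 then (1 : Int) else 0) :=
        ⟨_, rfl⟩
      have hc'nn : 0 ≤ c' := by rw [hc']; split <;> omega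
      have hcc : ((L / 180 : Nat) : Int) + (if 5 < L % 180 then (1 : Int) else 0) = c' + 1 := by
        rw [hq, hr, hc']; push_cast; ring
      rw [hcc, ← hc', if_pos (show c' + 1 ≠ 0 by omega)]
      by_cases h0 : c' = 0
      · rw [if_neg (by simp [h0]), h0]
        norm_num
      · rw [if_pos h0, pyIncBy_pyIncBy g (a.getD i 0) 1 c']
        congr 1
        ring
    rw [hsuf]
    exact outerA_fuel a (i + L) _ (f - (L - 180)) (f + 1 - L) (by omega) (by omega)
termination_by L

theorem outer_eq_foldl (a : List Int) (fuel : Nat) (i : Nat) (g : List Int)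
    (hf : a.length ≤ i + fuel) :
    outerA a i g fuel = (rle (a.drop i)).foldl stepB g := by
  induction fuel using Nat.strong_induction_on generalizing i g with
  | _ fuel ih =>
    by_cases hi : i < a.length
    · have hdrop : a.drop i = a.getD i 0 :: a.drop (i + 1) := by
        rw [List.drop_eq_getElem_cons hi, List.getD_eq_getElem _ _ hi]
      have hL : prefLen (a.getD i 0) (a.drop i) =
          prefLen (a.getD i 0) (a.drop (i + 1)) + 1 := by
        rw [hdrop]; simp [prefLen]
      have hrle : rle (a.drop i) =
          (a.getD i 0, prefLen (a.getD i 0) (a.drop (i + 1)) + 1) ::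
            rle (a.drop (i + (prefLen (a.getD i 0) (a.drop (i + 1)) + 1))) := by
        conv_lhs => rw [hdrop]
        rw [rle_cons]
        congr 1
        rw [List.drop_drop]
        have he : i + 1 + prefLen (a.getD i 0) (a.drop (i + 1)) =
            i + (prefLen (a.getD i 0) (a.drop (i + 1)) + 1) := by omega
        rw [he]
      have hLlen : i + (prefLen (a.getD i 0) (a.drop (i + 1)) + 1) ≤ a.length := by
        have h1 := prefLen_le_length (a.getD i 0) (a.drop i)
        rw [hL, List.length_drop] at h1; omega
      rw [outer_run _ a i g fuel hi hL hf, hrle]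
      simp only [List.foldl_cons]
      exact ih (fuel - (prefLen (a.getD i 0) (a.drop (i + 1)) + 1)) (by omega) _ _
        (by omega)
    · rw [List.drop_of_length_le (by omega)]
      cases fuel with
      | zero => rfl
      | succ f => rw [outerA, if_neg hi]; rfl

-- ===== VERDICT (by name: the statement is the Claim_ definition above) =====
theorem get_gesture_seq_count_spec : Claim_equal_get_gesture_seq_count := by
  intro a _ _
  unfold Spec_get_gesture_seq_count get_gesture_seq_count get_gesture_seq_count_alt
  simpa using outer_eq_foldl a a.length 0 (List.replicate 11 0) (by omega)
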